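-- pv_equiv track=rewrite | github.com/brahmcapoor/naming-changes-complexity | analysis/subject_analysis.py | find_turning_points
-- ===== SOURCE A (Python) =====
-- def find_turning_points(series):
--
--     turning_points = []
--     last_point = len(series) - 1
--
--     for i, point in enumerate(series):
--         if i != 0 and i != last_point:
--             if (point < series[i - 1] and point < series[i + 1]) or \
--             (point > series[i - 1] and point > series[i + 1]):
--
--                 turning_points.append(point)
--
--     return turning_points
-- ===== SOURCE B (Python) =====
-- def find_turning_points(series):
--     # Pass 1: run-length encode the series into (value, length) runs.
--     runs = []
--     prev = None
--     count = 0
--     for x in series: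
--         if count and x == prev:
--             count += 1
--         else:
--             if count:
--                 runs.append((prev, count))
--             prev, count = x, 1
--     if count:
--         runs.append((prev, count))
--     # Pass 2: an interior run is a turning point iff it has length 1 and its
--     # value is a strict extremum between the neighbouring runs' values.
--     out = []
--     for (p, _), (v, n), (q, _) in zip(runs, runs[1:], runs[2:]):
--         if n == 1 and ((v < p and v < q) or (v > p and v > q)):
--             out.append(v)
--     return out
-- ===== Notes on version B (the rewrite author's own statement) =====
-- stated objective: alternative
-- what changed: B run-length-encodes the series into (value, length) runs and then emits the value of each interior length-1 run that is a strict extremum between the neighbouring runs' values, instead of A's per-index comparison of every element with its two neighbours.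
import Mathlib
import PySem

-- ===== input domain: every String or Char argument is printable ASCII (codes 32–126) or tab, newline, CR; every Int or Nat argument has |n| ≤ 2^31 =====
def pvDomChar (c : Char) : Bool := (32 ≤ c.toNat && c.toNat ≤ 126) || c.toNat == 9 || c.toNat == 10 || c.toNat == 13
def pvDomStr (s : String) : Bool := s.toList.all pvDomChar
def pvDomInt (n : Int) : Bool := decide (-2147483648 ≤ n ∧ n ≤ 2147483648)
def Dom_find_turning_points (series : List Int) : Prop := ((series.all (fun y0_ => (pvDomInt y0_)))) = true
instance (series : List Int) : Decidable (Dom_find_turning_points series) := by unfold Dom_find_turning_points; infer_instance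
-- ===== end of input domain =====

-- B run-length-encodes the series into (value, length) runs and emits interior
-- length-1 runs that are strict extrema between neighbouring runs' values,
-- instead of A's per-index three-neighbour check (alternative algorithm).

-- ===== PORT A =====
-- The guard i ≠ 0 ∧ i ≠ last guarantees both indexed accesses are in range,
-- so the .getD 0 defaults are never used (Python never raises here).
def find_turning_points (series : List Int) : List Int :=
  let last_point : Int := (series.length : Int) - 1
  (PySem.List.enumerate series 0).foldl
    (fun turning_points p =>
      let i := p.1
      let point := p.2
      if i ≠ 0 ∧ i ≠ last_point then
        if (point < (PySem.List.pyGet? series (i - 1)).getD 0 ∧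
            point < (PySem.List.pyGet? series (i + 1)).getD 0) ∨
           (point > (PySem.List.pyGet? series (i - 1)).getD 0 ∧
            point > (PySem.List.pyGet? series (i + 1)).getD 0) then
          turning_points ++ [point]
        else turning_points
      else turning_points)
    []

-- ===== PORT B =====
-- Source B's first loop: state (runs, prev, count); `if count and x == prev` branch.
-- prev starts as Python None; it is only read when count ≠ 0, so 0 is a safe stand-in.
def find_turning_points_alt (series : List Int) : List Int :=
  let s := series.foldl
    (fun (st : List (Int × Int) × Int × Int) x =>
      if st.2.2 ≠ 0 ∧ x = st.2.1 then (st.1, st.2.1, st.2.2 + 1)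
      else ((if st.2.2 ≠ 0 then st.1 ++ [(st.2.1, st.2.2)] else st.1), x, 1))
    ([], 0, 0)
  let runs := if s.2.2 ≠ 0 then s.1 ++ [(s.2.1, s.2.2)] else s.1
  -- Source B's second loop: zip(runs, runs[1:], runs[2:]) with an if/append body
  ((runs.zip (PySem.List.slice runs (some 1) none)).zip (PySem.List.slice runs (some 2) none)).filterMap
    (fun q =>
      if q.1.2.2 = 1 ∧ ((q.1.2.1 < q.1.1.1 ∧ q.1.2.1 < q.2.1) ∨ (q.1.2.1 > q.1.1.1 ∧ q.1.2.1 > q.2.1))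
      then some q.1.2.1 else none)

-- ===== PRECONDITION & SPEC =====
def Spec_find_turning_points (series : List Int) (out : List Int) : Prop := out = find_turning_points_alt series
instance (series : List Int) (out : List Int) : Decidable (Spec_find_turning_points series out) := by unfold Spec_find_turning_points; infer_instance

-- ===== CLAIM (what is proved, stated in full; the proofs are below) =====
def Claim_equal_find_turning_points : Prop := ∀ (series : List Int), Dom_find_turning_points series → Spec_find_turning_points series (find_turning_points series)

-- ===== LEMMAS AND PROOFS =====

-- common window recursion: pvG a l emits each element of l that is a strict
-- local extremum given left neighbour a
def pvG : Int → List Int → List Int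
  | a, b :: c :: r => (if (b < a ∧ b < c) ∨ (b > a ∧ b > c) then [b] else []) ++ pvG b (c :: r)
  | _, _ => []

-- spec-level RLE with a carried run (prev value, count so far as a Nat)
def pvCarry : Int → Nat → List Int → List (Int × Int)
  | v, c, [] => [(v, (c : Int))]
  | v, c, x :: ys => if x = v then pvCarry v (c + 1) ys else (v, (c : Int)) :: pvCarry x 1 ys

-- spec-level scan over runs
def pvScan : List (Int × Int) → List Int
  | (p, _) :: (v, n) :: (q, m) :: r =>
      (if n = 1 ∧ ((v < p ∧ v < q) ∨ (v > p ∧ v > q)) then [v] else []) ++ pvScan ((v, n) :: (q, m) :: r)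
  | _ => []

theorem pvCarry_head (xs : List Int) : ∀ (v : Int) (c : Nat), ∃ t r, pvCarry v c xs = (v, t) :: r := by
  induction xs with
  | nil => intro v c; exact ⟨(c : Int), [], rfl⟩
  | cons x ys ih =>
    intro v c
    by_cases h : x = v
    · obtain ⟨t, r, hr⟩ := ih v (c + 1)
      exact ⟨t, r, by simp [pvCarry, h, hr]⟩
    · exact ⟨(c : Int), pvCarry x 1 ys, by simp [pvCarry, h]⟩

theorem pvG_cons_cons (p v : Int) (l : List Int) : pvG p (v :: v :: l) = pvG v (v :: l) := by
  rw [pvG, if_neg (by omega)]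
  simp

theorem pvG_skip (a : Int) (l : List Int) : pvG a (a :: l) = pvG a l := by
  cases l with
  | nil => rfl
  | cons c r => rw [pvG, if_neg (by omega)]; simp

theorem pvG_rep (k : Nat) : ∀ (p v : Int) (l : List Int),
    pvG p (List.replicate (k + 2) v ++ l) = pvG v (v :: l) := by
  induction k with
  | zero =>
    intro p v l
    show pvG p (v :: v :: l) = pvG v (v :: l)
    exact pvG_cons_cons p v l
  | succ k ih =>
    intro p v l
    show pvG p (v :: v :: (List.replicate (k + 1) v ++ l)) = pvG v (v :: l)
    rw [pvG_cons_cons]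
    have h2 : v :: (List.replicate (k + 1) v ++ l) = List.replicate (k + 2) v ++ l := rfl
    rw [h2]
    exact ih v v l

theorem pvG_replicate (n : Nat) (p v : Int) : pvG p (List.replicate n v) = [] := by
  cases n with
  | zero => rfl
  | succ m =>
    cases m with
    | zero => rfl
    | succ k =>
      rw [show List.replicate (k + 2) v = List.replicate (k + 2) v ++ [] from (List.append_nil _).symm,
        pvG_rep]
      rfl

theorem pvM (xs : List Int) : ∀ (v : Int) (c : Nat) (p m : Int),
    pvScan ((p, m) :: pvCarry v (c + 1) xs) = pvG p (List.replicate (c + 1) v ++ xs) := by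
  induction xs with
  | nil =>
    intro v c p m
    show pvScan [(p, m), (v, ((c + 1 : Nat) : Int))] = _
    rw [show pvScan [(p, m), (v, ((c + 1 : Nat) : Int))] = [] from rfl]
    rw [List.append_nil, pvG_replicate]
  | cons x ys ih =>
    intro v c p m
    by_cases h : x = v
    · subst h
      rw [show pvCarry x (c + 1) (x :: ys) = pvCarry x (c + 1 + 1) ys from by simp [pvCarry]]
      rw [ih x (c + 1) p m]
      congr 1
      rw [List.replicate_succ' (n := c + 1), List.append_assoc]
      rfl
    · rw [show pvCarry v (c + 1) (x :: ys) = (v, ((c + 1 : Nat) : Int)) :: pvCarry x 1 ys from by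
        simp [pvCarry, h]]
      obtain ⟨t, r, hr⟩ := pvCarry_head ys x 1
      rw [hr, pvScan, ← hr]
      rw [show (1 : Nat) = 0 + 1 from rfl] at hr ⊢
      rw [ih x 0 v ((c + 1 : Nat) : Int)]
      rw [show List.replicate (0 + 1) x ++ ys = x :: ys from rfl]
      cases c with
      | zero =>
        rw [show List.replicate (0 + 1) v ++ x :: ys = v :: x :: ys from rfl, pvG]
        norm_num
      | succ k =>
        rw [show ((k + 1 + 1 : Nat) : Int) = ((k : Int) + 2) from by push_cast; ring]
        rw [if_neg (by omega), pvG_rep, pvG_skip]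
        simp

theorem pvT2 (xs : List Int) : ∀ (v : Int) (c : Nat), pvScan (pvCarry v (c + 1) xs) = pvG v xs := by
  induction xs with
  | nil => intro v c; rfl
  | cons x ys ih =>
    intro v c
    by_cases h : x = v
    · subst h
      rw [show pvCarry x (c + 1) (x :: ys) = pvCarry x (c + 1 + 1) ys from by simp [pvCarry]]
      rw [ih x (c + 1), pvG_skip]
    · rw [show pvCarry v (c + 1) (x :: ys) = (v, ((c + 1 : Nat) : Int)) :: pvCarry x 1 ys from by
        simp [pvCarry, h]]
      rw [show (1 : Nat) = 0 + 1 from rfl, pvM ys x 0 v ((c + 1 : Nat) : Int)]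
      rfl

-- Source B's first loop + final flush computes pvCarry
theorem pvL1 (l : List Int) : ∀ (runs : List (Int × Int)) (prev : Int) (c : Nat),
    (let s := l.foldl
        (fun (st : List (Int × Int) × Int × Int) x =>
          if st.2.2 ≠ 0 ∧ x = st.2.1 then (st.1, st.2.1, st.2.2 + 1)
          else ((if st.2.2 ≠ 0 then st.1 ++ [(st.2.1, st.2.2)] else st.1), x, 1))
        (runs, prev, ((c : Int) + 1));
      if s.2.2 ≠ 0 then s.1 ++ [(s.2.1, s.2.2)] else s.1)
    = runs ++ pvCarry prev (c + 1) l := by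
  induction l with
  | nil =>
    intro runs prev c
    show (if ((c : Int) + 1) ≠ 0 then runs ++ [(prev, (c : Int) + 1)] else runs) = _
    rw [if_pos (by omega)]
    simp [pvCarry]
  | cons x ys ih =>
    intro runs prev c
    by_cases h : x = prev
    · have hs : (if ((c : Int) + 1) ≠ 0 ∧ x = prev then (runs, prev, ((c : Int) + 1) + 1)
          else ((if ((c : Int) + 1) ≠ 0 then runs ++ [(prev, (c : Int) + 1)] else runs), x, 1))
          = (runs, prev, (((c + 1 : Nat) : Int) + 1)) := by
        rw [if_pos ⟨by omega, h⟩]; push_cast; ring_nf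
      simp only [List.foldl_cons]
      rw [hs, ih runs prev (c + 1)]
      congr 1
      simp [pvCarry, h]
    · have hs : (if ((c : Int) + 1) ≠ 0 ∧ x = prev then (runs, prev, ((c : Int) + 1) + 1)
          else ((if ((c : Int) + 1) ≠ 0 then runs ++ [(prev, (c : Int) + 1)] else runs), x, 1))
          = (runs ++ [(prev, (c : Int) + 1)], x, (((0 : Nat) : Int) + 1)) := by
        rw [if_neg (by tauto), if_pos (by omega)]; norm_num
      simp only [List.foldl_cons]
      rw [hs, ih (runs ++ [(prev, (c : Int) + 1)]) x 0]
      rw [show pvCarry prev (c + 1) (x :: ys) = (prev, ((c + 1 : Nat) : Int)) :: pvCarry x 1 ys from by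
        simp [pvCarry, h]]
      push_cast
      simp

theorem pvSlice2 (xs : List (Int × Int)) : PySem.List.slice xs (some 2) none = xs.tail.tail := by
  have h : PySem.List.slice xs (some 2) none = List.drop 2 xs := by simp [pysem]
  rw [h, show (2 : Nat) = 1 + 1 from rfl, ← List.drop_drop, List.drop_one, List.drop_one]

-- Source B's second loop equals pvScan
theorem pvZ (t : List (Int × Int)) : ∀ (r1 r2 r3 : Int × Int),
    (((r1 :: r2 :: r3 :: t).zip (PySem.List.slice (r1 :: r2 :: r3 :: t) (some 1) none)).zip
        (PySem.List.slice (r1 :: r2 :: r3 :: t) (some 2) none)).filterMap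
      (fun q =>
        if q.1.2.2 = 1 ∧ ((q.1.2.1 < q.1.1.1 ∧ q.1.2.1 < q.2.1) ∨ (q.1.2.1 > q.1.1.1 ∧ q.1.2.1 > q.2.1))
        then some q.1.2.1 else none)
    = pvScan (r1 :: r2 :: r3 :: t) := by
  induction t with
  | nil =>
    intro ⟨p, m1⟩ ⟨v, n⟩ ⟨q, m3⟩
    simp only [PySem.List.slice_from_one, pvSlice2, List.tail_cons, List.zip_cons_cons,
      List.zip_nil_right, List.filterMap_cons, List.filterMap_nil, pvScan]
    split_ifs <;> simp
  | cons r4 t ih =>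
    intro ⟨p, m1⟩ ⟨v, n⟩ ⟨q, m3⟩
    have h := ih (v, n) (q, m3) r4
    simp only [PySem.List.slice_from_one, pvSlice2, List.tail_cons, List.zip_cons_cons,
      List.filterMap_cons] at h ⊢
    rw [pvScan, h]
    split_ifs <;> simp

theorem b_eq_scan (series : List Int) :
    find_turning_points_alt series
      = pvScan (match series with | a :: rest => pvCarry a 1 rest | [] => []) := by
  cases series with
  | nil => rfl
  | cons a rest =>
    show _ = pvScan (pvCarry a 1 rest)
    unfold find_turning_points_alt
    simp only [List.foldl_cons]
    rw [show (if (0 : Int) ≠ 0 ∧ a = 0 then (([] : List (Int × Int)), (0 : Int), (0 : Int) + 1)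
        else ((if (0 : Int) ≠ 0 then ([] : List (Int × Int)) ++ [((0 : Int), (0 : Int))] else []), a, 1))
        = ([], a, (((0 : Nat) : Int) + 1)) from by norm_num]
    have hL := pvL1 rest [] a 0
    simp only [] at hL
    rw [hL]
    simp only [List.nil_append]
    -- now the zip/filterMap over runs = pvScan runs
    obtain ⟨t0, r0, hr0⟩ := pvCarry_head rest a 1
    rw [hr0]
    match r0 with
    | [] => simp [PySem.List.slice_from_one, pvSlice2, pvScan]
    | [r2] =>
      simp only [PySem.List.slice_from_one, pvSlice2, List.tail_cons, List.zip_cons_cons,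
        List.zip_nil_right, List.filterMap_nil]
      obtain ⟨v2, n2⟩ := r2
      rfl
    | r2 :: r3 :: t => exact pvZ t (a, t0) r2 r3

theorem a_core (suf : List Int) : ∀ (p : List Int) (a : Int) (acc : List Int),
    (PySem.List.enumerate suf ((p.length : Int) + 1)).foldl
      (fun turning_points q =>
        let i := q.1
        let point := q.2
        if i ≠ 0 ∧ i ≠ (((p ++ a :: suf).length : Int) - 1) then
          if (point < (PySem.List.pyGet? (p ++ a :: suf) (i - 1)).getD 0 ∧
              point < (PySem.List.pyGet? (p ++ a :: suf) (i + 1)).getD 0) ∨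
             (point > (PySem.List.pyGet? (p ++ a :: suf) (i - 1)).getD 0 ∧
              point > (PySem.List.pyGet? (p ++ a :: suf) (i + 1)).getD 0) then
            turning_points ++ [point]
          else turning_points
        else turning_points)
      acc
    = acc ++ pvG a suf := by
  induction suf with
  | nil => intro p a acc; simp [PySem.List.enumerate, pvG]
  | cons b suf ih =>
    intro p a acc
    rw [PySem.List.enumerate_cons]
    cases suf with
    | nil =>
      have hlen : ((p.length : Int) + 1) = (((p ++ a :: [b]).length : Int) - 1) := by
        simp; omega
      simp only [List.foldl_cons, PySem.List.enumerate_nil, List.foldl_nil]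
      rw [if_neg (by omega : ¬ (((p.length : Int) + 1) ≠ 0 ∧ ((p.length : Int) + 1) ≠ (((p ++ a :: [b]).length : Int) - 1)))]
      simp [pvG]
    | cons c r =>
      have hguard : ((p.length : Int) + 1) ≠ 0 ∧ ((p.length : Int) + 1) ≠ (((p ++ a :: b :: c :: r).length : Int) - 1) := by
        constructor <;> simp <;> omega
      have hprev : PySem.List.pyGet? (p ++ a :: b :: c :: r) (((p.length : Int) + 1) - 1) = some a := by
        have h1 : ((p.length : Int) + 1) - 1 = (p.length : Int) := by ring
        rw [h1]
        exact PySem.List.pyGet?_append_length (pre := p) (y := a) (ys := b :: c :: r)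
      have hnext : PySem.List.pyGet? (p ++ a :: b :: c :: r) (((p.length : Int) + 1) + 1) = some c := by
        have := PySem.List.pyGet?_append_length (pre := p ++ [a, b]) (y := c) (ys := r)
        simp only [List.append_assoc, List.length_append] at this
        simp only [List.cons_append, List.nil_append] at this
        have h2 : ((p.length : Int) + 1) + 1 = (((p ++ [a, b]).length : Int)) := by simp; omega
        rw [h2]
        simpa [List.append_assoc] using this
      simp only [List.foldl_cons]
      rw [if_pos hguard, hprev, hnext]
      simp only [Option.getD_some]
      have hre : p ++ a :: b :: c :: r = (p ++ [a]) ++ b :: c :: r := by simp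
      have hoff : ((p.length : Int) + 1 + 1) = (((p ++ [a]).length : Int) + 1) := by simp
      by_cases hc : (b < a ∧ b < c) ∨ (b > a ∧ b > c)
      · rw [if_pos hc, hre, hoff, ih (p ++ [a]) b (acc ++ [b]), pvG, if_pos hc]
        simp
      · rw [if_neg hc, hre, hoff, ih (p ++ [a]) b acc, pvG, if_neg hc]
        simp

theorem a_eq_g : ∀ (series : List Int),
    find_turning_points series = (match series with | a :: rest => pvG a rest | [] => []) := by
  intro series
  cases series with
  | nil => simp [find_turning_points, PySem.List.enumerate]
  | cons a rest =>
    unfold find_turning_points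
    rw [PySem.List.enumerate_cons]
    simp only [List.foldl_cons]
    rw [if_neg (by simp)]
    have := a_core rest [] a []
    simpa using this

theorem b_eq_g : ∀ (series : List Int),
    find_turning_points_alt series = (match series with | a :: rest => pvG a rest | [] => []) := by
  intro series
  rw [b_eq_scan]
  cases series with
  | nil => rfl
  | cons a rest =>
    show pvScan (pvCarry a 1 rest) = pvG a rest
    rw [show (1 : Nat) = 0 + 1 from rfl, pvT2]

-- ===== VERDICT (by name: the statement is the Claim_ definition above) =====
theorem find_turning_points_spec : Claim_equal_find_turning_points := by
  intro series _
  unfold Spec_find_turning_points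
  rw [a_eq_g, b_eq_g]
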